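-- pv_equiv track=rewrite | github.com/ChrisCantReid623/Codefolio | infographic.py | count_capitalized
-- ===== SOURCE A (Python) =====
-- def count_capitalized(word_count_dict):
--     """
--     This function processes the keys of the dictionary parameter, tracking how many words are
--     capitalized and non-capitalized by the status of the first string character at index zero.
--
--     ---Parameters---
--     word_count_dict: a dictionary containing unique words and their frequencies as key:value pairs
--     """
--     capitalized_count = {'capitalized': 0, 'non-capitalized': 0}
--
--     for key, value in word_count_dict.items():
--         if key[0].isupper():
--             capitalized_count['capitalized'] += value
--         else:
--             capitalized_count['non-capitalized'] += value
--     return capitalized_count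
-- ===== SOURCE B (Python) =====
-- def count_capitalized(word_count_dict):
--     items = list(word_count_dict.items())
--
--     def go(lo, hi):
--         # divide and conquer over items[lo:hi]: returns (capitalized sum, non-capitalized sum)
--         if hi - lo == 0:
--             return (0, 0)
--         if hi - lo == 1:
--             key, value = items[lo]
--             return (value, 0) if key[0].isupper() else (0, value)
--         mid = (lo + hi) // 2
--         c1, n1 = go(lo, mid)
--         c2, n2 = go(mid, hi)
--         return (c1 + c2, n1 + n2)
--
--     cap, non = go(0, len(items))
--     return {'capitalized': cap, 'non-capitalized': non}
-- ===== Notes on version B (the rewrite author's own statement) =====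
-- stated objective: alternative
-- what changed: Replaces A's single left-to-right loop mutating a two-key dict with a divide-and-conquer recursion over the item list (split at the midpoint, classify single items at the leaves, add the two halves' (capitalized, non-capitalized) pairs).
import Mathlib
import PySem

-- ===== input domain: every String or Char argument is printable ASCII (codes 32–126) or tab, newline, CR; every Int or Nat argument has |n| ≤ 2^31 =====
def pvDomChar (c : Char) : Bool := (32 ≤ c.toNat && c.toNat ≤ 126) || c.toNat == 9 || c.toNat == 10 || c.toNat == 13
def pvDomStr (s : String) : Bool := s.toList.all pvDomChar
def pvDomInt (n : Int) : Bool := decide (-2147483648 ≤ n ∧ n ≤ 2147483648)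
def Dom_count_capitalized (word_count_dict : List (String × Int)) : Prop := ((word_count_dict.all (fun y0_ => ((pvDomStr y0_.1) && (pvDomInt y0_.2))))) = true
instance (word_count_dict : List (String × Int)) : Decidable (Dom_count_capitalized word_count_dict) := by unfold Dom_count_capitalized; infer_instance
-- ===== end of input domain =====

-- B replaces A's single accumulating loop with a divide-and-conquer recursion over the items (objective: alternative).

-- ===== PORT A =====
-- one loop step of A: key[0].isupper() branch, '+=' on the fixed-key dict (none = IndexError, excluded by Pre_)
def pvStepA (acc : PySem.Dict String Int) (kv : String × Int) : PySem.Dict String Int :=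
  match PySem.Str.pyGet? kv.1 0 with
  | none => acc
  | some c =>
      if PySem.Chars.isupper c then acc.modify "capitalized" 0 (· + kv.2)
      else acc.modify "non-capitalized" 0 (· + kv.2)

def count_capitalized (word_count_dict : List (String × Int)) : List (String × Int) :=
  (word_count_dict.foldl pvStepA
    ((PySem.Dict.empty.insert "capitalized" 0).insert "non-capitalized" 0)).items

-- ===== PORT B =====
-- B's inner go(lo, hi): divide-and-conquer over items[lo:hi]; the none branches are Python's
-- IndexError (out-of-range index / empty key), unreachable inside Pre_ on the indices go is called with
def pvGoB (items : List (String × Int)) (lo hi : Nat) : Int × Int :=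
  if hi - lo = 0 then (0, 0)
  else if hi - lo = 1 then
    match PySem.List.pyGet? items (lo : Int) with
    | none => (0, 0)
    | some kv =>
        match PySem.Str.pyGet? kv.1 0 with
        | none => (0, 0)
        | some c => if PySem.Chars.isupper c then (kv.2, 0) else (0, kv.2)
  else
    let mid := (lo + hi) / 2
    let p1 := pvGoB items lo mid
    let p2 := pvGoB items mid hi
    (p1.1 + p2.1, p1.2 + p2.2)
termination_by hi - lo
decreasing_by all_goals omega

def count_capitalized_alt (word_count_dict : List (String × Int)) : List (String × Int) :=
  let p := pvGoB word_count_dict 0 word_count_dict.length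
  [("capitalized", p.1), ("non-capitalized", p.2)]

-- ===== PRECONDITION & SPEC =====
-- Pre_ excludes dicts with an empty-string key, on which both Pythons raise IndexError (key[0]).
def Pre_count_capitalized (word_count_dict : List (String × Int)) : Prop :=
  ∀ p ∈ word_count_dict, p.1 ≠ ""
instance (word_count_dict : List (String × Int)) : Decidable (Pre_count_capitalized word_count_dict) := by unfold Pre_count_capitalized; infer_instance
def pvWitness_count_capitalized : (List (String × Int)) := [("Ab", 2), ("cd", 3)]

def Spec_count_capitalized (word_count_dict : List (String × Int)) (out : List (String × Int)) : Prop := out = count_capitalized_alt word_count_dict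
instance (word_count_dict : List (String × Int)) (out : List (String × Int)) : Decidable (Spec_count_capitalized word_count_dict out) := by unfold Spec_count_capitalized; infer_instance

-- ===== CLAIM (what is proved, stated in full; the proofs are below) =====
def Claim_equal_count_capitalized : Prop := ∀ (word_count_dict : List (String × Int)), Dom_count_capitalized word_count_dict → Pre_count_capitalized word_count_dict → Spec_count_capitalized word_count_dict (count_capitalized word_count_dict)

-- ===== LEMMAS AND PROOFS =====
-- key[0].isupper() as a predicate (false on "" only outside Pre_)
def pvFirstUpper (s : String) : Bool :=
  match PySem.Str.pyGet? s 0 with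
  | some c => PySem.Chars.isupper c
  | none => false

-- the (capitalized, non-capitalized) pair of sums a segment contributes
def pvF (l : List (String × Int)) : Int × Int :=
  (((l.filter (fun kv => pvFirstUpper kv.1)).map (·.2)).sum,
   ((l.filter (fun kv => !pvFirstUpper kv.1)).map (·.2)).sum)

theorem pvF_append (l1 l2 : List (String × Int)) :
    pvF (l1 ++ l2) = ((pvF l1).1 + (pvF l2).1, (pvF l1).2 + (pvF l2).2) := by
  simp [pvF]

-- loop invariant for A's fold: the two-key dict accumulates the two filtered sums
theorem pvLoopA (l : List (String × Int)) (c n : Int) (h : ∀ p ∈ l, p.1 ≠ "") :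
    l.foldl pvStepA (PySem.Dict.mk [("capitalized", c), ("non-capitalized", n)])
      = PySem.Dict.mk
          [("capitalized", c + (pvF l).1),
           ("non-capitalized", n + (pvF l).2)] := by
  induction l generalizing c n with
  | nil => simp [pvF]
  | cons kv rest ih =>
      have hkv : kv.1 ≠ "" := h kv (List.mem_cons_self)
      have hnil : kv.1.toList ≠ [] := fun hn => hkv (by
        cases hq : kv.1
        simp_all)
      have hget : ∃ ch, PySem.Str.pyGet? kv.1 0 = some ch := by
        cases hs : kv.1.toList with
        | nil => exact absurd hs hnil
        | cons ch t => exact ⟨ch, by simp [PySem.Str.pyGet?, PySem.Chars.pyGet?_eq_listPyGet?, hs, PySem.List.pyGet?, PySem.List.pyIdx?]⟩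
      obtain ⟨ch, hch⟩ := hget
      have hch' : PySem.List.pyGet? kv.1.toList 0 = some ch := by
        simpa [PySem.Str.pyGet?, PySem.Chars.pyGet?_eq_listPyGet?] using hch
      have hrest := fun c n => ih c n (fun p hp => h p (List.mem_cons_of_mem _ hp))
      have hfu : pvFirstUpper kv.1 = PySem.Chars.isupper ch := by simp only [pvFirstUpper, PySem.Str.pyGet?, PySem.Chars.pyGet?_eq_listPyGet?, hch']
      simp only [List.foldl_cons]
      by_cases hu : PySem.Chars.isupper ch
      · have hstep : pvStepA (PySem.Dict.mk [("capitalized", c), ("non-capitalized", n)]) kv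
            = PySem.Dict.mk [("capitalized", c + kv.2), ("non-capitalized", n)] := by
          simp [pvStepA, PySem.Str.pyGet?, PySem.Chars.pyGet?_eq_listPyGet?, hch', hu, PySem.Dict.modify, PySem.Dict.insert, PySem.Dict.getD, PySem.Dict.get?]
        rw [hstep, hrest _ _]
        simp only [pvF, List.filter_cons, hfu, hu, if_pos, List.map_cons, List.sum_cons, Bool.not_true, Bool.false_eq_true, ite_false]
        ring_nf
      · have hstep : pvStepA (PySem.Dict.mk [("capitalized", c), ("non-capitalized", n)]) kv
            = PySem.Dict.mk [("capitalized", c), ("non-capitalized", n + kv.2)] := by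
          simp [pvStepA, PySem.Str.pyGet?, PySem.Chars.pyGet?_eq_listPyGet?, hch', hu, PySem.Dict.modify, PySem.Dict.insert, PySem.Dict.getD, PySem.Dict.get?]
        rw [hstep, hrest _ _]
        have hfu' : pvFirstUpper kv.1 = false := by simp [hfu, hu]
        simp [pvF, hfu']
        ring_nf

-- B's divide-and-conquer computes pvF of the segment items[lo:hi]
theorem pvGoB_eq (items : List (String × Int)) (h : ∀ p ∈ items, p.1 ≠ "") :
    ∀ (k lo hi : Nat), hi - lo = k → lo ≤ hi → hi ≤ items.length →
      pvGoB items lo hi = pvF ((items.drop lo).take (hi - lo)) := by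
  intro k
  induction k using Nat.strong_induction_on with
  | _ k ih =>
    intro lo hi hk hlo hhi
    subst hk
    by_cases h0 : hi - lo = 0
    · rw [pvGoB]; simp [h0, pvF]
    · by_cases h1 : hi - lo = 1
      · rw [pvGoB]
        have hlt : lo < items.length := by omega
        have hget : PySem.List.pyGet? items (lo : Int) = some items[lo] :=
          PySem.List.pyGet?_ofNat items lo hlt
        have hmem : items[lo] ∈ items := List.getElem_mem hlt
        have hne : (items[lo]).1 ≠ "" := h _ hmem
        have hnil : (items[lo]).1.toList ≠ [] := fun hn => hne (by
          cases hq : (items[lo]).1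
          simp_all)
        have hslice : (items.drop lo).take (hi - lo) = [items[lo]] := by
          rw [h1]
          have hdl : items.drop lo = items[lo] :: items.drop (lo + 1) := List.drop_eq_getElem_cons hlt
          rw [hdl, List.take_succ_cons, List.take_zero]
        rw [hslice]
        simp only [h1, hget]
        obtain ⟨ch, hch⟩ : ∃ ch, PySem.Str.pyGet? (items[lo]).1 0 = some ch := by
          cases hs : (items[lo]).1.toList with
          | nil => exact absurd hs hnil
          | cons ch t => exact ⟨ch, by simp [PySem.Str.pyGet?, PySem.Chars.pyGet?_eq_listPyGet?, hs, PySem.List.pyGet?, PySem.List.pyIdx?]⟩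
        have hfu : pvFirstUpper (items[lo]).1 = PySem.Chars.isupper ch := by
          simp only [pvFirstUpper, hch]
        rw [hch]
        by_cases hu : PySem.Chars.isupper ch
        · simp [hu, pvF, hfu]
        · simp [hu, pvF, hfu]
      · rw [pvGoB]
        simp only [h0, if_false, h1]
        have hm1 : lo < (lo + hi) / 2 := by omega
        have hm2 : (lo + hi) / 2 < hi := by omega
        have e1 := ih ((lo + hi) / 2 - lo) (by omega) lo ((lo + hi) / 2) rfl (by omega) (by omega)
        have e2 := ih (hi - (lo + hi) / 2) (by omega) ((lo + hi) / 2) hi rfl (by omega) hhi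
        have hsplit : (items.drop lo).take (hi - lo)
            = (items.drop lo).take ((lo + hi) / 2 - lo) ++ (items.drop ((lo + hi) / 2)).take (hi - (lo + hi) / 2) := by
          have hdd : (items.drop lo).drop ((lo + hi) / 2 - lo) = items.drop ((lo + hi) / 2) := by
            rw [List.drop_drop]
            congr 1
            omega
          rw [← hdd, ← List.take_add]
          congr 1
          omega
        rw [e1, e2, hsplit, pvF_append]

-- ===== VERDICT (by name: the statement is the Claim_ definition above) =====
theorem count_capitalized_spec : Claim_equal_count_capitalized := by
  intro d _ hpre
  unfold Spec_count_capitalized count_capitalized count_capitalized_alt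
  have hinit : (PySem.Dict.empty.insert "capitalized" (0:Int)).insert "non-capitalized" 0
      = PySem.Dict.mk [("capitalized", 0), ("non-capitalized", 0)] := by decide
  rw [hinit, pvLoopA d 0 0 hpre]
  have hb := pvGoB_eq d hpre d.length 0 d.length rfl (Nat.zero_le _) le_rfl
  simp only [List.drop_zero, Nat.sub_zero, List.take_length] at hb
  simp [hb]
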